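-- pv_equiv track=rewrite | github.com/jorio/gitfourchette | gitfourchette/subpatch.py | quotePath
-- ===== SOURCE A (Python) =====
-- QUOTE_PATH_ESCAPES = {
--     ' ': ' ',
--     '"': '\\"',
--     '\a': '\\a',
--     '\b': '\\b',
--     '\t': '\\t',
--     '\n': '\\n',
--     '\v': '\\v',
--     '\f': '\\f',
--     '\r': '\\r',
--     '\\': '\\\\',
-- }
--
-- def quotePath(path: str) -> str:
--     quote = False
--     safePath = []
--
--     for c in path:
--         codepoint = ord(c)
--         if 0x21 <= codepoint <= 0x7e:  # copy ASCII characters '!' through '~' verbatim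
--             safePath.append(c)
--             continue
--
--         if not quote:
--             safePath.insert(0, '"')
--             quote = True
--
--         try:
--             safePath.append(QUOTE_PATH_ESCAPES[c])
--         except KeyError:
--             safePath.append(f"\\{codepoint:03o}")
--
--     if quote:
--         safePath.append('"')
--
--     return "".join(safePath)
-- ===== SOURCE B (Python) =====
-- QUOTE_PATH_ESCAPES = {
--     ' ': ' ',
--     '"': '\\"',
--     '\a': '\\a',
--     '\b': '\\b',
--     '\t': '\\t',
--     '\n': '\\n',
--     '\v': '\\v',
--     '\f': '\\f',
--     '\r': '\\r',
--     '\\': '\\\\',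
-- }
--
--
-- def quotePath(path: str) -> str:
--     # find the first character that is not printable ASCII '!'..'~'
--     i = next((j for j, c in enumerate(path)
--               if not (0x21 <= ord(c) <= 0x7e)), None)
--     if i is None:
--         # fast path: nothing to escape, the string is returned untouched
--         return path
--     # the prefix path[:i] is copied verbatim by slicing; only the tail
--     # from the first unsafe character onward is run through the escaper
--     escaped = "".join(
--         c if 0x21 <= ord(c) <= 0x7e
--         else QUOTE_PATH_ESCAPES.get(c, f"\\{ord(c):03o}")
--         for c in path[i:]
--     )
--     return '"' + path[:i] + escaped + '"'
-- ===== Notes on version B (the rewrite author's own statement) =====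
-- stated objective: alternative
-- what changed: Replaces A's single flagged loop (with mid-stream insert(0) of the opening quote) by a find-first-unsafe-index search with an early return of the untouched string when none is found, verbatim slice copy of the safe prefix, and escaping applied only to the tail from that index on.
import Mathlib
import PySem

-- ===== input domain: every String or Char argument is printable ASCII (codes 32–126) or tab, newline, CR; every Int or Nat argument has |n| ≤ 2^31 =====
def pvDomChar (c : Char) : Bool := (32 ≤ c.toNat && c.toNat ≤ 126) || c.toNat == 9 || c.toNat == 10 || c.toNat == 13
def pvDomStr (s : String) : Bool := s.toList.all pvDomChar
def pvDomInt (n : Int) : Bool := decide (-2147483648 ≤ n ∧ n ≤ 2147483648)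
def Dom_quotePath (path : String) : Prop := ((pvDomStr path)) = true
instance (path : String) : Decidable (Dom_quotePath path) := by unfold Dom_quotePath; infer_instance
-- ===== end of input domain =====

-- B replaces A's single flagged loop (with mid-stream insert(0) of the opening quote) by a
-- find-first-unsafe-index search with an early untouched return, verbatim slice copy of the
-- safe prefix, and escaping of the tail only (objective: alternative).

-- shared module-level context: QUOTE_PATH_ESCAPES and Python's f"\\{n:03o}" formatting
def pvEsc? (c : Char) : Option String :=
  if c = ' ' then some " "
  else if c = '"' then some "\\\""
  else if c = Char.ofNat 7 then some "\\a"
  else if c = Char.ofNat 8 then some "\\b"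
  else if c = Char.ofNat 9 then some "\\t"
  else if c = Char.ofNat 10 then some "\\n"
  else if c = Char.ofNat 11 then some "\\v"
  else if c = Char.ofNat 12 then some "\\f"
  else if c = Char.ofNat 13 then some "\\r"
  else if c = '\\' then some "\\\\"
  else none

-- f"\\{n:03o}" : octal digits of n, zero-padded on the left to width 3 (exact for all n)
def pvOct (n : Nat) : String :=
  let ds := Nat.toDigits 8 n
  "\\" ++ String.ofList (List.replicate (3 - ds.length) '0' ++ ds)

-- ===== PORT A =====
def quotePathStep (st : Bool × List String) (c : Char) : Bool × List String :=
  let quote := st.1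
  let safePath := st.2
  if 0x21 ≤ c.toNat ∧ c.toNat ≤ 0x7e then
    (quote, safePath ++ [String.singleton c])
  else
    let quote' := true
    let safePath' := if !quote then "\"" :: safePath else safePath
    (quote', safePath' ++ [match pvEsc? c with
                           | some s => s
                           | none => pvOct c.toNat])

def quotePath (path : String) : String :=
  let r := path.toList.foldl quotePathStep (false, [])
  String.join (if r.1 then r.2 ++ ["\""] else r.2)

-- ===== PORT B =====
-- per-character escaper used by Source B's generator expression over the tail
def escB (c : Char) : String :=
  if 0x21 ≤ c.toNat ∧ c.toNat ≤ 0x7e then String.singleton c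
  else (pvEsc? c).getD (pvOct c.toNat)

def quotePath_alt (path : String) : String :=
  let l := path.toList
  match l.findIdx? (fun c => !(decide (0x21 ≤ c.toNat ∧ c.toNat ≤ 0x7e))) with
  | none => path
  | some i =>
      "\"" ++ String.ofList (l.take i) ++ String.join ((l.drop i).map escB) ++ "\""

-- ===== PRECONDITION & SPEC =====
def Spec_quotePath (path : String) (out : String) : Prop := out = quotePath_alt path
instance (path : String) (out : String) : Decidable (Spec_quotePath path out) := by unfold Spec_quotePath; infer_instance

-- ===== CLAIM (what is proved, stated in full; the proofs are below) =====
def Claim_equal_quotePath : Prop := ∀ (path : String), Dom_quotePath path → Spec_quotePath path (quotePath path)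

-- ===== LEMMAS AND PROOFS =====

theorem escB_safe {c : Char} (h : 0x21 ≤ c.toNat ∧ c.toNat ≤ 0x7e) :
    escB c = String.singleton c := by
  simp [escB, h]

theorem escB_unsafe {c : Char} (h : ¬(0x21 ≤ c.toNat ∧ c.toNat ≤ 0x7e)) :
    (match pvEsc? c with | some s => s | none => pvOct c.toNat) = escB c := by
  simp only [escB, if_neg h]
  cases pvEsc? c <;> rfl

-- once the quote flag is set, A's loop only appends escaped pieces
theorem foldA_true (l : List Char) (sp : List String) :
    l.foldl quotePathStep (true, sp) = (true, sp ++ l.map escB) := by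
  induction l generalizing sp with
  | nil => simp
  | cons c t ih =>
    rw [List.foldl_cons]
    by_cases h : 0x21 ≤ c.toNat ∧ c.toNat ≤ 0x7e
    · simp only [quotePathStep, if_pos h, ih, escB_safe h, List.map_cons,
        List.append_assoc, List.singleton_append]
    · simp only [quotePathStep, if_neg h, Bool.not_true, Bool.false_eq_true, if_false, ih,
        escB_unsafe h, List.map_cons, List.append_assoc, List.singleton_append]

-- characterisation of A's loop from the initial state
theorem foldA (l : List Char) (sp : List String) :
    l.foldl quotePathStep (false, sp) =
      (l.any (fun c => !(decide (0x21 ≤ c.toNat ∧ c.toNat ≤ 0x7e))),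
       (if l.any (fun c => !(decide (0x21 ≤ c.toNat ∧ c.toNat ≤ 0x7e))) then "\"" :: sp else sp)
         ++ l.map escB) := by
  induction l generalizing sp with
  | nil => simp
  | cons c t ih =>
    rw [List.foldl_cons, List.any_cons]
    by_cases h : 0x21 ≤ c.toNat ∧ c.toNat ≤ 0x7e
    · rw [quotePathStep, if_pos h, ih]
      cases ht : t.any (fun c => !(decide (0x21 ≤ c.toNat ∧ c.toNat ≤ 0x7e))) <;>
        simp [h, escB_safe h, List.append_assoc]
    · rw [quotePathStep, if_neg h]
      simp only [Bool.not_false, if_true, foldA_true, escB_unsafe h]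
      simp [h, List.append_assoc]

theorem foldl_str_shift (l : List String) (x : String) :
    l.foldl (fun r s => r ++ s) x = x ++ l.foldl (fun r s => r ++ s) "" := by
  induction l generalizing x with
  | nil => simp
  | cons a t ih =>
    rw [List.foldl_cons, List.foldl_cons, ih (x ++ a), ih ("" ++ a)]
    simp [String.append_assoc]

theorem join_cons (a : String) (t : List String) :
    String.join (a :: t) = a ++ String.join t := by
  show (a :: t).foldl (fun r s => r ++ s) "" = a ++ t.foldl (fun r s => r ++ s) ""
  rw [List.foldl_cons, foldl_str_shift]
  simp

theorem join_append (a b : List String) :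
    String.join (a ++ b) = String.join a ++ String.join b := by
  induction a with
  | nil => simp [String.join]
  | cons x t ih => rw [List.cons_append, join_cons, join_cons, ih, String.append_assoc]

theorem join_singletons (l : List Char) :
    String.join (l.map String.singleton) = String.ofList l := by
  induction l with
  | nil => rfl
  | cons c t ih =>
    rw [List.map_cons, join_cons, ih, ← List.singleton_append, String.ofList_append]
    congr 1

-- a prefix of safe characters joins to itself
theorem join_map_safe (l : List Char) (h : ∀ c ∈ l, (0x21 ≤ c.toNat ∧ c.toNat ≤ 0x7e)) :
    String.join (l.map escB) = String.ofList l := by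
  rw [show l.map escB = l.map String.singleton from
    List.map_congr_left (fun c hc => escB_safe (h c hc))]
  exact join_singletons l

-- findIdx? = some i means: the first i characters are safe
theorem findIdx?_take {p : Char → Bool} (l : List Char) (i : Nat)
    (h : l.findIdx? p = some i) : ∀ c ∈ l.take i, p c = false := by
  induction l generalizing i with
  | nil => simp at h
  | cons a t ih =>
    rw [List.findIdx?_cons] at h
    by_cases ha : p a
    · simp [ha] at h; simp [← h]
    · cases hft : t.findIdx? p with
      | none => rw [hft] at h; simp [ha] at h
      | some j =>
        rw [hft] at h
        simp [ha] at h
        subst h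
        intro c hc
        rw [List.take_succ_cons, List.mem_cons] at hc
        rcases hc with rfl | hc
        · simpa using ha
        · exact ih j hft c hc

-- findIdx? = some i means some character is unsafe
theorem findIdx?_any {p : Char → Bool} (l : List Char) (i : Nat)
    (h : l.findIdx? p = some i) : l.any p = true := by
  induction l generalizing i with
  | nil => simp at h
  | cons a t ih =>
    rw [List.findIdx?_cons] at h
    by_cases ha : p a
    · simp [ha]
    · cases hft : t.findIdx? p with
      | none => rw [hft] at h; simp [ha] at h
      | some j => simp [ih j hft]

-- ===== VERDICT (by name: the statement is the Claim_ definition above) =====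
theorem quotePath_spec : Claim_equal_quotePath := by
  intro path _
  unfold Spec_quotePath quotePath quotePath_alt
  rw [foldA]
  cases hf : path.toList.findIdx? (fun c => !(decide (0x21 ≤ c.toNat ∧ c.toNat ≤ 0x7e))) with
  | none =>
    have hall : ∀ c ∈ path.toList, (0x21 ≤ c.toNat ∧ c.toNat ≤ 0x7e) := by
      intro c hc
      have := List.findIdx?_eq_none_iff.mp hf c hc
      simpa using this
    have hany : path.toList.any (fun c => !(decide (0x21 ≤ c.toNat ∧ c.toNat ≤ 0x7e))) = false := by
      simp only [List.any_eq_false]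
      intro c hc; simpa using hall c hc
    simp only [hf, hany, Bool.false_eq_true, if_false, List.nil_append]
    rw [join_map_safe _ hall, String.ofList_toList]
  | some i =>
    have hany := findIdx?_any _ _ hf
    have hsafe : ∀ c ∈ path.toList.take i, (0x21 ≤ c.toNat ∧ c.toNat ≤ 0x7e) := by
      intro c hc
      have := findIdx?_take _ _ hf c hc
      simpa using this
    have hsplit : path.toList.map escB
        = (path.toList.take i).map escB ++ (path.toList.drop i).map escB := by
      rw [← List.map_append, List.take_append_drop]
    simp only [hf, hany, if_true, List.nil_append, List.cons_append]
    rw [hsplit, join_cons, join_append, join_append, join_cons, join_map_safe _ hsafe]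
    simp [String.join, String.append_assoc]
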